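-- pv_equiv track=rewrite | github.com/zoulei/pokerweb | app/real_time_parser.py | _split_board_cards
-- ===== SOURCE A (Python) =====
-- from typing import Optional, Dict, Any, List, Tuple
--
-- def _split_board_cards(board: str) -> List[str]:
--     cards = []
--     i = 0
--     while i < len(board) - 1:
--         rank = board[i]
--         suit = board[i + 1]
--         if suit.lower() in ('s', 'h', 'd', 'c'):
--             cards.append(rank + suit)
--             i += 2
--         else:
--             i += 1
--     return cards
-- ===== SOURCE B (Python) =====
-- import re
--
-- def _split_board_cards(board):
--     # One regex scan: a card is any char followed by a suit letter; DOTALL so a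
--     # newline rank is accepted too.  findall's non-overlapping left-to-right
--     # matching reproduces the greedy "take 2 here, else advance 1" behaviour.
--     return re.findall(r'(?s).[shdcSHDC]', board)
-- ===== Notes on version B (the rewrite author's own statement) =====
-- stated objective: idiomatic
-- what changed: The explicit index loop with manual 1-or-2 step advancement is replaced by a single regex scan re.findall(r'(?s).[shdcSHDC]', board), whose non-overlapping left-to-right matching yields the card list directly.
import Mathlib
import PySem

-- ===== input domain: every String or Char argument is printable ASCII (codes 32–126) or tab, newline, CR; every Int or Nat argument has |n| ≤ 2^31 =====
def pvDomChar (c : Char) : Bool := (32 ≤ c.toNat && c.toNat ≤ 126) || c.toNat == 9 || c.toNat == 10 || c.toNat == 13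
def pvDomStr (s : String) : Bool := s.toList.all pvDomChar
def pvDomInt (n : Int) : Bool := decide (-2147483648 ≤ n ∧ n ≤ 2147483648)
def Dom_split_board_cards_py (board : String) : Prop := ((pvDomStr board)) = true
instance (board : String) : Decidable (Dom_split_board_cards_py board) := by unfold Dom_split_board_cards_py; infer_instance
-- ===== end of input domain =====

-- B replaces A's index loop by one regex scan (re.findall(r'(?s).[shdcSHDC]')); same cost, more idiomatic.

-- ===== PORT A =====
-- A's suit test: suit.lower() in ('s','h','d','c'); Char.toLower is exact on ASCII.
def pvIsSuitA (c : Char) : Bool :=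
  c.toLower == 's' || c.toLower == 'h' || c.toLower == 'd' || c.toLower == 'c'

-- the while loop of A: index i over the characters, accumulator `cards`
def pvALoop (chars : List Char) (i : Nat) (cards : List String) : List String :=
  if h : i + 1 < chars.length then      -- i < len(board) - 1 (over ℤ; exact since i, len ≥ 0)
    -- rank = board[i], suit = board[i+1]
    if pvIsSuitA chars[i + 1] then
      pvALoop chars (i + 2) (cards ++ [String.ofList [chars[i], chars[i + 1]]])
    else
      pvALoop chars (i + 1) cards
  else cards
termination_by chars.length - i

def split_board_cards_py (board : String) : List String :=
  pvALoop board.toList 0 []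

-- ===== PORT B =====
-- B is one regex scan: findall(r'(?s).[shdcSHDC]') — ported by hand as the
-- regex engine's non-overlapping left-to-right matching of that exact pattern
-- (exact: `(?s).` matches any single char, `[shdcSHDC]` this literal char class).
def pvIsSuitClass (c : Char) : Bool :=
  c == 's' || c == 'h' || c == 'd' || c == 'c' ||
  c == 'S' || c == 'H' || c == 'D' || c == 'C'

def pvFindAll : List Char → List String
  | r :: s :: rest =>
    if pvIsSuitClass s then String.ofList [r, s] :: pvFindAll rest
    else pvFindAll (s :: rest)
  | _ => []

def split_board_cards_py_alt (board : String) : List String :=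
  pvFindAll board.toList

-- ===== PRECONDITION & SPEC =====
def Spec_split_board_cards_py (board : String) (out : List String) : Prop := out = split_board_cards_py_alt board
instance (board : String) (out : List String) : Decidable (Spec_split_board_cards_py board out) := by unfold Spec_split_board_cards_py; infer_instance

-- ===== CLAIM (what is proved, stated in full; the proofs are below) =====
def Claim_equal_split_board_cards_py : Prop := ∀ (board : String), Dom_split_board_cards_py board → Spec_split_board_cards_py board (split_board_cards_py board)

-- ===== LEMMAS AND PROOFS =====

theorem pvSuit_eq (c : Char) : pvIsSuitA c = pvIsSuitClass c := by
  simp only [pvIsSuitA, pvIsSuitClass, Char.toLower]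
  split <;> rename_i h <;>
  · rw [Bool.eq_iff_iff]
    simp only [Bool.or_eq_true, beq_iff_eq, Char.ext_iff, UInt32.ext_iff, UInt32.le_iff_toNat_le,
      UInt32.toNat_add, show 'A'.val.toNat = 65 from rfl, show 'Z'.val.toNat = 90 from rfl,
      show 'S'.val.toNat = 83 from rfl, show 'H'.val.toNat = 72 from rfl,
      show 'D'.val.toNat = 68 from rfl, show 'C'.val.toNat = 67 from rfl,
      show 's'.val.toNat = 115 from rfl, show 'h'.val.toNat = 104 from rfl,
      show 'd'.val.toNat = 100 from rfl, show 'c'.val.toNat = 99 from rfl,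
      show ('a'.val - 'A'.val).toNat = 32 from rfl] at h ⊢
    omega

theorem pvDrop_two (chars : List Char) (i : Nat) (h : i + 1 < chars.length) :
    chars.drop i = chars[i] :: chars[i + 1] :: chars.drop (i + 2) := by
  rw [List.drop_eq_getElem_cons (by omega), List.drop_eq_getElem_cons h]

theorem pvALoop_eq (n : Nat) (chars : List Char) (i : Nat) (cards : List String)
    (hn : chars.length - i ≤ n) :
    pvALoop chars i cards = cards ++ pvFindAll (chars.drop i) := by
  induction n generalizing i cards with
  | zero =>
    have h : ¬ (i + 1 < chars.length) := by omega
    rw [pvALoop, dif_neg h]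
    have : chars.drop i = [] := List.drop_eq_nil_of_le (by omega)
    simp [this, pvFindAll]
  | succ n ih =>
    rw [pvALoop]
    by_cases h : i + 1 < chars.length
    · rw [dif_pos h]
      rw [pvDrop_two chars i h, pvSuit_eq]
      by_cases hs : pvIsSuitClass chars[i + 1]
      · simp only [hs, if_pos, pvFindAll]
        rw [ih (i + 2) _ (by omega)]
        simp
      · simp only [hs, if_neg, Bool.false_eq_true, not_false_iff, pvFindAll]
        rw [ih (i + 1) _ (by omega), List.drop_eq_getElem_cons h]
    · rw [dif_neg h]
      have : chars.drop i = [] ∨ ∃ c, chars.drop i = [c] := by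
        rcases e : chars.drop i with _ | ⟨c, _ | _⟩
        · exact Or.inl rfl
        · exact Or.inr ⟨c, rfl⟩
        · exfalso
          have := congrArg List.length e
          simp at this; omega
      rcases this with e | ⟨c, e⟩ <;> simp [e, pvFindAll]

-- ===== VERDICT (by name: the statement is the Claim_ definition above) =====
theorem split_board_cards_py_spec : Claim_equal_split_board_cards_py := by
  intro board _
  unfold Spec_split_board_cards_py split_board_cards_py split_board_cards_py_alt
  simpa using pvALoop_eq board.toList.length board.toList 0 [] (by omega)
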